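-- pv_equiv track=rewrite | github.com/PhoenixIIexe/predprofit | task5.py | group_by_error
-- ===== SOURCE A (Python) =====
-- from typing import List, Dict, Tuple
--
-- def group_by_error(table: List[List[str]]) -> Dict[str, List[Tuple[str]]]:
--     """
--     Группировка по именам ошибки
--
--     table - данные таблицы
--     """
--
--     res = {}
--     for row in table:
--         game_name, character, name_error, _ = row
--         if name_error not in res:
--             res[name_error] = []
--         res[name_error].append((game_name, character))
--
--     return res
-- ===== SOURCE B (Python) =====
-- from typing import List, Dict, Tuple
--
-- def group_by_error(table: List[List[str]]) -> Dict[str, List[Tuple[str]]]: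
--     # Alternative decomposition: first pass collects the distinct error names in
--     # first-occurrence order; a dict comprehension then rescans the table per key.
--     keys = []
--     for _game_name, _character, name_error, _ in table:
--         if name_error not in keys:
--             keys.append(name_error)
--     return {k: [(g, c) for g, c, e, _ in table if e == k] for k in keys}
-- ===== Notes on version B (the rewrite author's own statement) =====
-- stated objective: alternative
-- what changed: A builds the result dict in one pass, appending to per-key lists as it goes; B first collects the distinct error names in first-occurrence order and then builds the dict with a comprehension that rescans the table once per key.
import Mathlib
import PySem

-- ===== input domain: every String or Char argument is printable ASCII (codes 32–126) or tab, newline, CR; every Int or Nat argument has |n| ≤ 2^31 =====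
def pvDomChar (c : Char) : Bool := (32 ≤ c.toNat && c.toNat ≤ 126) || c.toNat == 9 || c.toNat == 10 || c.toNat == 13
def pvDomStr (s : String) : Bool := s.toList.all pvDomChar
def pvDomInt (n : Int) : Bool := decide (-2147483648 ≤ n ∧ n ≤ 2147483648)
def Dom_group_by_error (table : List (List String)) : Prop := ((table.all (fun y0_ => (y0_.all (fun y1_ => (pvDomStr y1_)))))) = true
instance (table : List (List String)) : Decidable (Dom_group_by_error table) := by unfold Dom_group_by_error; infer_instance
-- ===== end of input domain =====

-- B replaces A's single dict-building pass by a distinct-keys pass followed by a per-key rescan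
-- of the table (same result, a different traversal; no speed claim).


-- ===== PORT A =====
-- rows that do not unpack into four values make the Python raise ValueError: excluded by Pre_
def group_by_error (table : List (List String)) : List (String × List (String × String)) :=
  (table.foldl (fun res row =>
      match row with
      | [game_name, character, name_error, _x] =>
        let res := if !(res.contains name_error) then res.insert name_error [] else res
        res.modify name_error [] (fun l => l ++ [(game_name, character)])
      | _ => res)
    PySem.Dict.empty).items

-- ===== PORT B =====
def group_by_error_alt (table : List (List String)) : List (String × List (String × String)) :=
  let keys := table.foldl (fun ks row =>
      if row.length = 4 then
        if !(ks.contains (row.getD 2 "")) then ks ++ [row.getD 2 ""] else ks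
      else ks) ([] : List String)
  keys.map (fun k => (k,
    table.foldl (fun acc row =>
        if row.length = 4 then
          if row.getD 2 "" == k then acc ++ [(row.getD 0 "", row.getD 1 "")] else acc
        else acc) []))

-- ===== PRECONDITION & SPEC =====
-- Pre_ excludes tables with a row whose length is not 4; Python A raises ValueError there.
def Pre_group_by_error (table : List (List String)) : Prop := ∀ row ∈ table, row.length = 4
instance (table : List (List String)) : Decidable (Pre_group_by_error table) := by unfold Pre_group_by_error; infer_instance
def pvWitness_group_by_error : List (List String) :=
  [["g1", "c1", "e1", "x"], ["g2", "c2", "e2", "y"], ["g3", "c3", "e1", "z"]]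
def Spec_group_by_error (table : List (List String)) (out : List (String × List (String × String))) : Prop := out = group_by_error_alt table
instance (table : List (List String)) (out : List (String × List (String × String))) : Decidable (Spec_group_by_error table out) := by unfold Spec_group_by_error; infer_instance

-- ===== CLAIM (what is proved, stated in full; the proofs are below) =====
def Claim_equal_group_by_error : Prop := ∀ (table : List (List String)), Dom_group_by_error table → Pre_group_by_error table → Spec_group_by_error table (group_by_error table)

-- ===== LEMMAS AND PROOFS =====

-- the (error-name, (game, character)) pairs of the well-formed rows, in order
def pvPairs : List (List String) → List (String × (String × String))
  | [] => []
  | row :: t =>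
    match row with
    | [g, c, e, _x] => (e, (g, c)) :: pvPairs t
    | _ => pvPairs t

theorem pv_insert_modify_absent {κ ν : Type} [BEq κ] [LawfulBEq κ]
    (d : PySem.Dict κ ν) (e : κ) (v0 : ν) (f : ν → ν)
    (h : d.contains e = false) : (d.insert e v0).modify e v0 f = d.modify e v0 f := by
  simp only [PySem.Dict.modify]
  rw [PySem.Dict.insert_insert_self, PySem.Dict.getD_insert_self,
    PySem.Dict.getD_of_not_contains d v0 h]

theorem pv_foldA (table : List (List String)) :
    ∀ d : PySem.Dict String (List (String × String)),
    table.foldl (fun res row =>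
      match row with
      | [game_name, character, name_error, _x] =>
        let res := if !(res.contains name_error) then res.insert name_error [] else res
        res.modify name_error [] (fun l => l ++ [(game_name, character)])
      | _ => res) d
    = (pvPairs table).foldl (fun d p => d.modify p.1 [] (fun l => l ++ [p.2])) d := by
  induction table with
  | nil => intro d; rfl
  | cons row t ih =>
    intro d
    match row with
    | [] => simpa [pvPairs] using ih d
    | [a] => simpa [pvPairs] using ih d
    | [a, b] => simpa [pvPairs] using ih d
    | [a, b, c] => simpa [pvPairs] using ih d
    | a :: b :: c :: e :: f :: r => simpa [pvPairs] using ih d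
    | [g, c, e, x] =>
      simp only [pvPairs, List.foldl_cons]
      rw [ih]
      congr 1
      by_cases hc : d.contains e = true
      · simp [hc]
      · simp only [Bool.not_eq_true] at hc
        simp [hc, pv_insert_modify_absent d e _ _ hc]

theorem pv_foldB_keys (table : List (List String)) :
    ∀ ks : List String,
    table.foldl (fun ks row =>
      if row.length = 4 then
        if !(ks.contains (row.getD 2 "")) then ks ++ [row.getD 2 ""] else ks
      else ks) ks
    = PySem.Set.update ks ((pvPairs table).map (·.1)) := by
  induction table with
  | nil => intro ks; simp [pvPairs, PySem.Set.update_nil]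
  | cons row t ih =>
    intro ks
    match row with
    | [] => simpa [pvPairs] using ih ks
    | [a] => simpa [pvPairs] using ih ks
    | [a, b] => simpa [pvPairs] using ih ks
    | [a, b, c] => simpa [pvPairs] using ih ks
    | a :: b :: c :: e :: f :: r =>
      have hl : (a :: b :: c :: e :: f :: r).length ≠ 4 := by simp
      simpa [pvPairs, hl] using ih ks
    | [g, c, e, x] =>
      simp only [pvPairs, List.foldl_cons, List.map_cons, List.length_cons, List.length_nil,
        if_true]
      rw [show ([g, c, e, x] : List String).getD 2 "" = e from rfl]
      rw [PySem.Set.update_cons, ih]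
      congr 1
      rw [PySem.Set.add_eq_ite]
      by_cases hm : e ∈ ks
      · simp [hm]
      · simp [hm]

theorem pv_foldB_group (table : List (List String)) (k : String) :
    ∀ acc : List (String × String),
    table.foldl (fun acc row =>
      if row.length = 4 then
        if row.getD 2 "" == k then acc ++ [(row.getD 0 "", row.getD 1 "")] else acc
      else acc) acc
    = acc ++ ((pvPairs table).filter (fun p => p.1 == k)).map (·.2) := by
  induction table with
  | nil => intro acc; simp [pvPairs]
  | cons row t ih =>
    intro acc
    match row with
    | [] => simpa [pvPairs] using ih acc
    | [a] => simpa [pvPairs] using ih acc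
    | [a, b] => simpa [pvPairs] using ih acc
    | [a, b, c] => simpa [pvPairs] using ih acc
    | a :: b :: c :: e :: f :: r =>
      have hl : (a :: b :: c :: e :: f :: r).length ≠ 4 := by simp
      simpa [pvPairs, hl] using ih acc
    | [g, c, e, x] =>
      simp only [pvPairs, List.foldl_cons, List.filter_cons, List.length_cons, List.length_nil,
        if_true]
      rw [show ([g, c, e, x] : List String).getD 2 "" = e from rfl,
        show ([g, c, e, x] : List String).getD 0 "" = g from rfl,
        show ([g, c, e, x] : List String).getD 1 "" = c from rfl]
      rw [ih]
      by_cases he : (e == k) = true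
      · simp [he]
      · have hne : e ≠ k := by simpa using he
        simp [hne]

-- ===== VERDICT (by name: the statement is the Claim_ definition above) =====
theorem group_by_error_spec : Claim_equal_group_by_error := by
  intro table _hdom _hpre
  unfold Spec_group_by_error group_by_error group_by_error_alt
  rw [pv_foldA, pv_foldB_keys]
  have hnd : ((pvPairs table).foldl (fun d p => d.modify p.1 [] (fun l => l ++ [p.2]))
      PySem.Dict.empty).keys.Nodup := by
    exact PySem.Dict.nodup_keys_foldl_modify_key (pvPairs table) (·.1) []
      (fun _ p => fun l => l ++ [p.2]) PySem.Dict.empty (by simp)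
  rw [PySem.Dict.items_eq_map_keys _ hnd []]
  rw [PySem.Dict.keys_foldl_modify_key]
  rw [PySem.Dict.keys_empty, PySem.Set.update_nil_left]
  simp only [pv_foldB_group]
  apply List.map_congr_left
  intro k _hk
  rw [PySem.Dict.getD_foldl_modify_append, PySem.Dict.getD_empty]
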